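-- pv_equiv track=rewrite | github.com/tropical42/CSC-110 | Assignment 5/assign5a.py | compute_only_eaten
-- ===== SOURCE A (Python) =====
-- def compute_only_eaten(life):
-- 	eaters = []
-- 	eaten = []
-- 	for i in life:
-- 		eaters.append(i)
--
-- 		for j in life[i]:
-- 			eaten.append(j)
--
-- 	only_eaten = []
--
-- 	for i in eaten:
-- 		if i not in eaters:
-- 			if i not in only_eaten:
-- 				only_eaten.append(i)
--
-- 	return sorted(only_eaten)
-- ===== SOURCE B (Python) =====
-- def compute_only_eaten(life):
--     # Sort the multiset of eaten values and the keys once, then take their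
--     # difference by merging the two sorted lists; duplicates are removed by
--     # skipping adjacent equal values, so no membership test is ever run.
--     vals = sorted(v for vs in life.values() for v in vs)
--     keys = sorted(life)
--     out = []
--     while vals:
--         v = vals[0]
--         if keys and keys[0] < v:
--             keys = keys[1:]
--             continue
--         if keys and keys[0] == v:
--             vals = vals[1:]
--             continue
--         out.append(v)
--         vals = vals[1:]
--         while vals and vals[0] == v:
--             vals = vals[1:]
--     return out
-- ===== Notes on version B (the rewrite author's own statement) =====
-- stated objective: faster
-- what changed: B sorts the flattened values and the keys up front and computes the difference by merging the two sorted lists, deduplicating by skipping adjacent equal values, so A's three loops with per-element list-membership tests and the dedup branch disappear entirely.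
import Mathlib
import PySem

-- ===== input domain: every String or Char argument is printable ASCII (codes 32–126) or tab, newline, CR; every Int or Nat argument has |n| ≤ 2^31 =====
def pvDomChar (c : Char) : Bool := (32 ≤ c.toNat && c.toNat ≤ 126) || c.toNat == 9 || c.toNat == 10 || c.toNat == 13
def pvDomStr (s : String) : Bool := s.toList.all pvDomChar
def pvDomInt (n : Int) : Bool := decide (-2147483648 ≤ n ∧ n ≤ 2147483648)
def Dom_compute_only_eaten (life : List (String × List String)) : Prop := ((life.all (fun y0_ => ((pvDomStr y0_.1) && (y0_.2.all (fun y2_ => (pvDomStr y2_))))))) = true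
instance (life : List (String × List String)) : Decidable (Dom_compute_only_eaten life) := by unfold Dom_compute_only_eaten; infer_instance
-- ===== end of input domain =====

-- B sorts values and keys once and takes their difference by one recursive merge
-- of the two sorted lists (dedup by skipping adjacent equals), replacing A's
-- membership-test loops; return value only, neither version mutates its argument.

-- ===== PORT A =====
def compute_only_eaten (life : List (String × List String)) : List String :=
  let eaters := life.foldl (fun acc p => acc ++ [p.1]) []
  let eaten := life.foldl (fun acc p => p.2.foldl (fun a j => a ++ [j]) acc) []
  let only_eaten := eaten.foldl (fun acc i =>
      if eaters.contains i then acc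
      else if acc.contains i then acc else acc ++ [i]) []
  PySem.List.sorted only_eaten (fun x => x) false

-- ===== PORT B =====
-- 'while rest and rest[0] == v: rest = rest[1:]' of _merge_diff
def pvSkipEq (v : String) : List String → List String
  | [] => []
  | x :: xs => if x = v then pvSkipEq v xs else x :: xs

theorem pvSkipEq_length_le (v : String) (xs : List String) :
    (pvSkipEq v xs).length ≤ xs.length := by
  induction xs with
  | nil => simp [pvSkipEq]
  | cons x xs ih =>
    by_cases h : x = v
    · simp only [pvSkipEq, if_pos h]; exact Nat.le_succ_of_le ih
    · simp [pvSkipEq, if_neg h]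

-- the outer 'while vals:' loop of B, consuming the heads of vals/keys and
-- appending surviving values to out
def pvMergeLoop : List String → List String → List String → List String
  | [], _, out => out
  | v :: rest, k :: ks, out =>
      if k < v then pvMergeLoop (v :: rest) ks out
      else if k = v then pvMergeLoop rest (k :: ks) out
      else pvMergeLoop (pvSkipEq v rest) (k :: ks) (out ++ [v])
  | v :: rest, [], out => pvMergeLoop (pvSkipEq v rest) [] (out ++ [v])
termination_by vals keys _ => (vals.length, keys.length)
decreasing_by
  · exact Prod.Lex.right _ (Nat.lt_succ_self _)
  · exact Prod.Lex.left _ _ (Nat.lt_succ_self _)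
  · exact Prod.Lex.left _ _ (Nat.lt_succ_of_le (pvSkipEq_length_le _ _))
  · exact Prod.Lex.left _ _ (Nat.lt_succ_of_le (pvSkipEq_length_le _ _))

def compute_only_eaten_alt (life : List (String × List String)) : List String :=
  let vals := PySem.List.sorted (life.flatMap (fun p => p.2)) (fun x => x) false
  let keys := PySem.List.sorted (life.map (fun p => p.1)) (fun x => x) false
  pvMergeLoop vals keys []

-- ===== PRECONDITION & SPEC =====
def Spec_compute_only_eaten (life : List (String × List String)) (out : List String) : Prop := out = compute_only_eaten_alt life
instance (life : List (String × List String)) (out : List String) : Decidable (Spec_compute_only_eaten life out) := by unfold Spec_compute_only_eaten; infer_instance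

-- ===== CLAIM (what is proved, stated in full; the proofs are below) =====
def Claim_equal_compute_only_eaten : Prop := ∀ (life : List (String × List String)), Dom_compute_only_eaten life → Spec_compute_only_eaten life (compute_only_eaten life)

-- ===== LEMMAS AND PROOFS =====
-- proof-side recursive form of B's merge loop (the loop is this recursion with
-- an output accumulator)
def pvMergeDiff : List String → List String → List String
  | [], _ => []
  | v :: rest, k :: ks =>
      if k < v then pvMergeDiff (v :: rest) ks
      else if k = v then pvMergeDiff rest (k :: ks)
      else [v] ++ pvMergeDiff (pvSkipEq v rest) (k :: ks)
  | v :: rest, [] => [v] ++ pvMergeDiff (pvSkipEq v rest) []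
termination_by vals keys => (vals.length, keys.length)
decreasing_by
  · exact Prod.Lex.right _ (Nat.lt_succ_self _)
  · exact Prod.Lex.left _ _ (Nat.lt_succ_self _)
  · exact Prod.Lex.left _ _ (Nat.lt_succ_of_le (pvSkipEq_length_le _ _))
  · exact Prod.Lex.left _ _ (Nat.lt_succ_of_le (pvSkipEq_length_le _ _))

theorem pvMergeLoop_eq : ∀ (vals keys out : List String),
    pvMergeLoop vals keys out = out ++ pvMergeDiff vals keys
  | [], keys, out => by simp [pvMergeLoop, pvMergeDiff]
  | v :: rest, k :: ks, out => by
    rw [pvMergeLoop, pvMergeDiff]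
    by_cases h1 : k < v
    · rw [if_pos h1, if_pos h1, pvMergeLoop_eq]
    · by_cases h2 : k = v
      · rw [if_neg h1, if_pos h2, if_neg h1, if_pos h2, pvMergeLoop_eq]
      · rw [if_neg h1, if_neg h2, if_neg h1, if_neg h2, pvMergeLoop_eq]
        simp
  | v :: rest, [], out => by
    rw [pvMergeLoop, pvMergeDiff, pvMergeLoop_eq]
    simp
termination_by vals keys _ => (vals.length, keys.length)
decreasing_by
  · exact Prod.Lex.right _ (Nat.lt_succ_self _)
  · exact Prod.Lex.left _ _ (Nat.lt_succ_self _)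
  · exact Prod.Lex.left _ _ (Nat.lt_succ_of_le (pvSkipEq_length_le _ _))
  · exact Prod.Lex.left _ _ (Nat.lt_succ_of_le (pvSkipEq_length_le _ _))

theorem pv_foldl_app (xs acc : List String) :
    xs.foldl (fun a j => a ++ [j]) acc = acc ++ xs := by
  induction xs generalizing acc with
  | nil => simp
  | cons x xs ih => simp [List.foldl, ih]

theorem pv_eaters_eq (life : List (String × List String)) (acc : List String) :
    life.foldl (fun acc p => acc ++ [p.1]) acc = acc ++ life.map (fun p => p.1) := by
  induction life generalizing acc with
  | nil => simp
  | cons p l ih => simp [List.foldl, ih]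

theorem pv_eaten_eq (life : List (String × List String)) (acc : List String) :
    life.foldl (fun acc p => p.2.foldl (fun a j => a ++ [j]) acc) acc
      = acc ++ life.flatMap (fun p => p.2) := by
  induction life generalizing acc with
  | nil => simp
  | cons p l ih =>
    rw [List.foldl_cons, pv_foldl_app, ih]
    simp

theorem pv_mem_only (t xs : List String) : ∀ (acc : List String) (y : String),
    y ∈ xs.foldl (fun acc i =>
      if t.contains i then acc
      else if acc.contains i then acc else acc ++ [i]) acc ↔
    y ∈ acc ∨ (y ∈ xs ∧ y ∉ t) := by
  induction xs with
  | nil => simp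
  | cons x xs ih =>
    intro acc y
    rw [List.foldl_cons, ih]
    by_cases hxt : t.contains x
    · have hxt' : x ∈ t := by simpa using hxt
      rw [if_pos hxt]
      simp only [List.mem_cons]
      constructor
      · rintro (h | ⟨h1, h2⟩)
        · exact Or.inl h
        · exact Or.inr ⟨Or.inr h1, h2⟩
      · rintro (h | ⟨h1 | h1, h2⟩)
        · exact Or.inl h
        · exact absurd (h1 ▸ hxt') h2
        · exact Or.inr ⟨h1, h2⟩
    · have hxt' : x ∉ t := by simpa using hxt
      rw [if_neg (by simpa using hxt)]
      by_cases hxa : acc.contains x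
      · have hxa' : x ∈ acc := by simpa using hxa
        rw [if_pos hxa]
        simp only [List.mem_cons]
        constructor
        · rintro (h | ⟨h1, h2⟩)
          · exact Or.inl h
          · exact Or.inr ⟨Or.inr h1, h2⟩
        · rintro (h | ⟨h1 | h1, h2⟩)
          · exact Or.inl h
          · exact Or.inl (h1 ▸ hxa')
          · exact Or.inr ⟨h1, h2⟩
      · rw [if_neg (by simpa using hxa)]
        simp only [List.mem_append, List.mem_cons, List.not_mem_nil, or_false]
        constructor
        · rintro ((h | h) | ⟨h1, h2⟩)
          · exact Or.inl h
          · exact Or.inr ⟨Or.inl h, h ▸ hxt'⟩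
          · exact Or.inr ⟨Or.inr h1, h2⟩
        · rintro (h | ⟨h1 | h1, h2⟩)
          · exact Or.inl (Or.inl h)
          · exact Or.inl (Or.inr h1)
          · exact Or.inr ⟨h1, h2⟩

theorem pv_nodup_only (t xs : List String) : ∀ (acc : List String), acc.Nodup →
    (xs.foldl (fun acc i =>
      if t.contains i then acc
      else if acc.contains i then acc else acc ++ [i]) acc).Nodup := by
  induction xs with
  | nil => intro acc h; simpa using h
  | cons x xs ih =>
    intro acc h
    rw [List.foldl_cons]
    by_cases hxt : t.contains x
    · rw [if_pos hxt]; exact ih acc h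
    · rw [if_neg (by simpa using hxt)]
      by_cases hxa : acc.contains x
      · rw [if_pos hxa]; exact ih acc h
      · rw [if_neg (by simpa using hxa)]
        refine ih _ ?_
        have hxa' : x ∉ acc := by simpa using hxa
        refine List.Nodup.append h (List.nodup_singleton x) ?_
        simpa [List.disjoint_singleton] using hxa'

theorem pvSkipEq_sublist (v : String) (xs : List String) :
    (pvSkipEq v xs).Sublist xs := by
  induction xs with
  | nil => simp [pvSkipEq]
  | cons x xs ih =>
    by_cases h : x = v
    · simp only [pvSkipEq, if_pos h]
      exact ih.trans (List.sublist_cons_self x xs)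
    · simp [pvSkipEq, if_neg h]

theorem pvSkipEq_mem (v : String) (xs : List String)
    (hs : xs.Pairwise (· ≤ ·)) (hle : ∀ x ∈ xs, v ≤ x) (y : String) :
    y ∈ pvSkipEq v xs ↔ y ∈ xs ∧ y ≠ v := by
  induction xs with
  | nil => simp [pvSkipEq]
  | cons x xs ih =>
    rw [List.pairwise_cons] at hs
    by_cases h : x = v
    · simp only [pvSkipEq, if_pos h]
      rw [ih hs.2 (fun z hz => hle z (List.mem_cons_of_mem x hz))]
      subst h
      constructor
      · rintro ⟨h1, h2⟩; exact ⟨List.mem_cons_of_mem x h1, h2⟩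
      · rintro ⟨h1, h2⟩
        rcases List.mem_cons.mp h1 with h1 | h1
        · exact absurd h1 h2
        · exact ⟨h1, h2⟩
    · simp only [pvSkipEq, if_neg h]
      have hvx : v < x := lt_of_le_of_ne (hle x (List.mem_cons_self)) (Ne.symm h)
      constructor
      · intro hy
        refine ⟨hy, ?_⟩
        rcases List.mem_cons.mp hy with h1 | h1
        · exact fun hc => h (h1 ▸ hc ▸ rfl)
        · exact ne_of_gt (lt_of_lt_of_le hvx (hs.1 y h1))
      · exact fun h => h.1

-- the central invariant of B's merge: on sorted inputs the result is strictly
-- increasing and contains exactly the values that are not keys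
theorem pvMergeDiff_spec : ∀ (vals keys : List String),
    vals.Pairwise (· ≤ ·) → keys.Pairwise (· ≤ ·) →
    (pvMergeDiff vals keys).Pairwise (· < ·) ∧
      ∀ y, y ∈ pvMergeDiff vals keys ↔ y ∈ vals ∧ y ∉ keys
  | [], keys => by intro _ _; simp [pvMergeDiff]
  | v :: rest, k :: ks => by
    intro hv hk
    rw [List.pairwise_cons] at hv hk
    by_cases hkv : k < v
    · rw [pvMergeDiff, if_pos hkv]
      obtain ⟨hp, hm⟩ := pvMergeDiff_spec (v :: rest) ks
        (List.pairwise_cons.mpr hv) hk.2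
      refine ⟨hp, fun y => ?_⟩
      rw [hm y]
      constructor
      · rintro ⟨h1, h2⟩
        refine ⟨h1, fun hc => ?_⟩
        rcases List.mem_cons.mp hc with h3 | h3
        · have hvy : v ≤ y := by
            rcases List.mem_cons.mp h1 with h4 | h4
            · exact h4 ▸ le_refl v
            · exact hv.1 y h4
          exact absurd (h3 ▸ hkv) (not_lt.mpr hvy)
        · exact h2 h3
      · rintro ⟨h1, h2⟩
        exact ⟨h1, fun hc => h2 (List.mem_cons_of_mem k hc)⟩
    · by_cases hkev : k = v
      · rw [pvMergeDiff, if_neg hkv, if_pos hkev]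
        obtain ⟨hp, hm⟩ := pvMergeDiff_spec rest (k :: ks)
          hv.2 (List.pairwise_cons.mpr hk)
        refine ⟨hp, fun y => ?_⟩
        rw [hm y]
        constructor
        · rintro ⟨h1, h2⟩; exact ⟨List.mem_cons_of_mem v h1, h2⟩
        · rintro ⟨h1, h2⟩
          rcases List.mem_cons.mp h1 with h1 | h1
          · exact absurd (List.mem_cons_self) (h1 ▸ hkev ▸ h2)
          · exact ⟨h1, h2⟩
      · rw [pvMergeDiff, if_neg hkv, if_neg hkev]
        have hsub := pvSkipEq_sublist v rest
        obtain ⟨hp, hm⟩ := pvMergeDiff_spec (pvSkipEq v rest) (k :: ks)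
          (List.Pairwise.sublist hsub hv.2) (List.pairwise_cons.mpr hk)
        have hvk : v < k := lt_of_le_of_ne (le_of_not_gt hkv) (Ne.symm hkev)
        have hvnot : v ∉ k :: ks := by
          intro hc
          rcases List.mem_cons.mp hc with h1 | h1
          · exact hkev (h1.symm)
          · exact absurd (lt_of_lt_of_le hvk (hk.1 v h1)) (lt_irrefl v)
        have hmem := pvSkipEq_mem v rest hv.2 hv.1
        constructor
        · rw [List.singleton_append, List.pairwise_cons]
          refine ⟨fun y hy => ?_, hp⟩
          have := ((hm y).mp hy).1
          rw [hmem y] at this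
          exact lt_of_le_of_ne (hv.1 y this.1) (Ne.symm this.2)
        · intro y
          rw [List.singleton_append, List.mem_cons, hm y, hmem y]
          constructor
          · rintro (h | ⟨⟨h1, _⟩, h2⟩)
            · exact ⟨h ▸ List.mem_cons_self, h ▸ hvnot⟩
            · exact ⟨List.mem_cons_of_mem v h1, h2⟩
          · rintro ⟨h1, h2⟩
            rcases List.mem_cons.mp h1 with h1 | h1
            · exact Or.inl h1
            · by_cases hyv : y = v
              · exact Or.inl hyv
              · exact Or.inr ⟨⟨h1, hyv⟩, h2⟩
  | v :: rest, [] => by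
    intro hv _
    rw [List.pairwise_cons] at hv
    rw [pvMergeDiff]
    have hsub := pvSkipEq_sublist v rest
    obtain ⟨hp, hm⟩ := pvMergeDiff_spec (pvSkipEq v rest) []
      (List.Pairwise.sublist hsub hv.2) List.Pairwise.nil
    have hmem := pvSkipEq_mem v rest hv.2 hv.1
    constructor
    · rw [List.singleton_append, List.pairwise_cons]
      refine ⟨fun y hy => ?_, hp⟩
      have := ((hm y).mp hy).1
      rw [hmem y] at this
      exact lt_of_le_of_ne (hv.1 y this.1) (Ne.symm this.2)
    · intro y
      rw [List.singleton_append, List.mem_cons, hm y, hmem y]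
      simp only [List.not_mem_nil, not_false_iff, and_true, List.mem_cons]
      constructor
      · rintro (h | ⟨h1, _⟩)
        · exact Or.inl h
        · exact Or.inr h1
      · rintro (h | h)
        · exact Or.inl h
        · by_cases hyv : y = v
          · exact Or.inl hyv
          · exact Or.inr ⟨h, hyv⟩
termination_by vals keys => (vals.length, keys.length)
decreasing_by
  · exact Prod.Lex.right _ (Nat.lt_succ_self _)
  · exact Prod.Lex.left _ _ (Nat.lt_succ_self _)
  · exact Prod.Lex.left _ _ (Nat.lt_succ_of_le (pvSkipEq_length_le _ _))
  · exact Prod.Lex.left _ _ (Nat.lt_succ_of_le (pvSkipEq_length_le _ _))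

-- ===== VERDICT (by name: the statement is the Claim_ definition above) =====
theorem compute_only_eaten_spec : Claim_equal_compute_only_eaten := by
  intro life _
  unfold Spec_compute_only_eaten compute_only_eaten compute_only_eaten_alt
  simp only [pv_eaters_eq, pv_eaten_eq, List.nil_append, pvMergeLoop_eq]
  set S := life.flatMap (fun p => p.2) with hS
  set K := life.map (fun p => p.1) with hK
  obtain ⟨hp, hm⟩ := pvMergeDiff_spec
    (PySem.List.sorted S (fun x => x) false) (PySem.List.sorted K (fun x => x) false)
    (PySem.List.sorted_pairwise S (fun x => x)) (PySem.List.sorted_pairwise K (fun x => x))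
  apply PySem.List.sorted_eq_of_perm_of_pairwise_lt
  · refine (List.perm_ext_iff_of_nodup ?_
      (pv_nodup_only _ _ _ List.nodup_nil)).mpr ?_
    · exact hp.imp ne_of_lt
    · intro y
      rw [hm y, pv_mem_only]
      simp [PySem.List.mem_sorted]
  · exact hp
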